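-- pv_equiv track=rewrite | github.com/nattigy/competitive_programming | bootcamp 2021 fall/B. Code For 1.py | CodeFor1Recursion
-- ===== SOURCE A (Python) =====
-- def CodeFor1Recursion(num):
--     if num <= 1:
--         return [num]
--     result = [num//2, num%2, num//2]
--     response = []
--     for r in result:
--         val = CodeFor1Recursion(r)
--         for v in val:
--             response.append(v)
--     return response
-- ===== SOURCE B (Python) =====
-- def CodeFor1Recursion(num):
--     if num <= 1:
--         return [num]
--     # collect the binary digits of num below the top bit, least significant first
--     bits = []
--     n = num
--     while n > 1:
--         bits.append(n % 2)
--         n //= 2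
--     # build the in-order sequence iteratively: start from the top bit (always 1)
--     # and for each lower bit b (most significant first) expand res -> res + [b] + res
--     res = [1]
--     for bit in reversed(bits):
--         res = res + [bit] + res
--     return res
-- ===== Notes on version B (the rewrite author's own statement) =====
-- stated objective: faster
-- what changed: Replaced A's three-way recursion (recursing twice per level and appending element by element) with an iterative bottom-up build: collect num's binary digits once in a small loop, then fold res -> res + [bit] + res over the digits, so the exponential-size output is assembled by O(log n) list concatenations instead of exponentially many recursive calls and per-element appends.
import Mathlib
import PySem

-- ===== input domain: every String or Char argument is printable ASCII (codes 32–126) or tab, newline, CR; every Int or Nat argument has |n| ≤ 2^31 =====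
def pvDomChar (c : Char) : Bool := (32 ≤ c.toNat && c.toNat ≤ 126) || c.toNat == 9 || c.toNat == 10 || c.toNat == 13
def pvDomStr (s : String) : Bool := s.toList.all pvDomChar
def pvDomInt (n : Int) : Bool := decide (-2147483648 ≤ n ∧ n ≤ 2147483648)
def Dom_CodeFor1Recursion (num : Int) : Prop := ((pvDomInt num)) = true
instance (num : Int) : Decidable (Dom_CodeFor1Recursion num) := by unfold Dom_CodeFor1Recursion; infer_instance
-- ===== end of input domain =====

-- B replaces A's three-way recursion by an iterative fold over num's binary digits (alternative decomposition, same output).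

-- ===== PORT A =====
-- literal port of A: recursion on [num//2, num%2, num//2], appending each recursive result.
-- The Nat argument is pure fuel making the recursion structural; fuel num.toNat is always sufficient (proved below).
def CodeFor1RecursionFuel : Nat → Int → List Int
  | 0, num => [num]          -- reached only with num ≤ 1 (fuel invariant), where A returns [num]
  | f + 1, num =>
    if num ≤ 1 then [num]
    else
      let result := [PySem.Int.floordiv num 2, PySem.Int.mod num 2, PySem.Int.floordiv num 2]
      result.foldl (fun response r => response ++ CodeFor1RecursionFuel f r) []

def CodeFor1Recursion (num : Int) : List Int := CodeFor1RecursionFuel num.toNat num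

-- ===== PORT B =====
-- bits = []; while n > 1: bits.append(n % 2); n //= 2   (same fuel device for the while loop)
def pvBitsFuel : Nat → Int → List Int
  | 0, _ => []
  | f + 1, n => if 1 < n then PySem.Int.mod n 2 :: pvBitsFuel f (PySem.Int.floordiv n 2) else []

-- res = [1]; for bit in reversed(bits): res = res + [bit] + res
def CodeFor1Recursion_alt (num : Int) : List Int :=
  if num ≤ 1 then [num]
  else (pvBitsFuel num.toNat num).reverse.foldl (fun res bit => res ++ [bit] ++ res) [1]

-- ===== PRECONDITION & SPEC =====
def Spec_CodeFor1Recursion (num : Int) (out : List Int) : Prop := out = CodeFor1Recursion_alt num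
instance (num : Int) (out : List Int) : Decidable (Spec_CodeFor1Recursion num out) := by unfold Spec_CodeFor1Recursion; infer_instance

-- ===== CLAIM (what is proved, stated in full; the proofs are below) =====
def Claim_equal_CodeFor1Recursion : Prop := ∀ (num : Int), Dom_CodeFor1Recursion num → Spec_CodeFor1Recursion num (CodeFor1Recursion num)

-- ===== LEMMAS AND PROOFS =====

-- A returns [n] on every n ≤ 1, with any fuel
theorem pvFuelBase (f : Nat) (n : Int) (h : n ≤ 1) : CodeFor1RecursionFuel f n = [n] := by
  cases f with
  | zero => rfl
  | succ f => rw [CodeFor1RecursionFuel, if_pos h]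

-- the fold over the reversed digit list of q computes exactly A's recursion, for every q ≥ 1 and sufficient fuel
theorem pvKey : ∀ (f : Nat) (q : Int), q.toNat ≤ f → 1 ≤ q →
    (pvBitsFuel f q).reverse.foldl (fun res bit => res ++ [bit] ++ res) [1] = CodeFor1RecursionFuel f q := by
  intro f
  induction f with
  | zero => intro q hf hq; omega
  | succ f ih =>
    intro q hf hq
    by_cases h1 : q ≤ 1
    · have : q = 1 := le_antisymm h1 hq
      subst this
      rw [pvBitsFuel, if_neg (by omega)]
      rw [CodeFor1RecursionFuel, if_pos le_rfl]
      simp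
    · have hq2 : 2 ≤ q := by omega
      rw [pvBitsFuel, if_pos (by omega)]
      rw [CodeFor1RecursionFuel, if_neg h1]
      have hfd : PySem.Int.floordiv q 2 = q / 2 :=
        PySem.Int.floordiv_eq_ediv_of_pos (by omega)
      have hmod : PySem.Int.mod q 2 = q % 2 := PySem.Int.mod_eq_emod_of_pos (by omega)
      have ihq : (pvBitsFuel f (q / 2)).reverse.foldl
          (fun res bit => res ++ [bit] ++ res) [1] = CodeFor1RecursionFuel f (q / 2) := by
        apply ih <;> omega
      have hA2 : CodeFor1RecursionFuel f (q % 2) = [q % 2] := pvFuelBase f (q % 2) (by omega)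
      rw [hfd, hmod, List.reverse_cons, List.foldl_append]
      simp only [List.foldl_cons, List.foldl_nil, ihq]
      simp [hA2]

-- ===== VERDICT (by name: the statement is the Claim_ definition above) =====
theorem CodeFor1Recursion_spec : Claim_equal_CodeFor1Recursion := by
  intro num _
  show CodeFor1Recursion num = CodeFor1Recursion_alt num
  by_cases h : num ≤ 1
  · rw [CodeFor1Recursion, CodeFor1Recursion_alt, if_pos h, pvFuelBase _ _ h]
  · rw [CodeFor1Recursion, CodeFor1Recursion_alt, if_neg h]
    exact (pvKey num.toNat num le_rfl (by omega)).symm
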